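-- pv_equiv track=rewrite | github.com/Budapest-Quantum-Computing-Group/piquasso | scripts/gate_synthesis/normal_ordering.py | normal_polynomial_text
-- ===== SOURCE A (Python) =====
-- def normal_polynomial_text(order: int) -> str:
--     if order == 0:
--         return ""
--
--     poly = ""
--
--     for i in range(order):
--         poly += ("d" * (order - i)) + ("a" * i) + " + "
--
--     poly += ("a" * order) + " + "
--
--     return poly + normal_polynomial_text(order - 1)
-- ===== SOURCE B (Python) =====
-- def normal_polynomial_text(order: int) -> str:
--     parts = []
--     for k in range(order, 0, -1):
--         for i in range(k):
--             parts.append("d" * (k - i) + "a" * i + " + ")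
--         parts.append("a" * k + " + ")
--     return "".join(parts)
-- ===== Notes on version B (the rewrite author's own statement) =====
-- stated objective: simpler
-- what changed: Replaces A's tail recursion (which rebuilds the inner loop per call and concatenates strings with +=) by one flat double loop over k from order down to 1 that collects the terms in a list and joins them once.
import Mathlib
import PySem

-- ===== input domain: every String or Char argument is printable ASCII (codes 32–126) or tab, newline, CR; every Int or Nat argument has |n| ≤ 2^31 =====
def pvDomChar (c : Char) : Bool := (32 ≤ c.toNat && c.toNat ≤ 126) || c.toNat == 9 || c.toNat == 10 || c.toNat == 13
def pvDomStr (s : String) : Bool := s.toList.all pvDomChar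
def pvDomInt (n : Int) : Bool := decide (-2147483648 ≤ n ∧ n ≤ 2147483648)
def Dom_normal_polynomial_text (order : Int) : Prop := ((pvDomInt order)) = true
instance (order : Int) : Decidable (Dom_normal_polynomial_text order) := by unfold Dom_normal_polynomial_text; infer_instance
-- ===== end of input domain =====

-- B replaces A's recursion by one flat double loop collected into a list and joined once (objective: simpler).

-- ===== PORT A =====
-- A's recursion, on the nonnegative domain (Pre_ excludes negative order, where A raises RecursionError).
def pvArec : Nat → String
  | 0 => ""
  | n + 1 =>
    let poly :=
      (List.range (n + 1)).foldl
        (fun poly i =>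
          poly ++ String.mk (List.replicate (n + 1 - i) 'd')
               ++ String.mk (List.replicate i 'a') ++ " + ") ""
    let poly := poly ++ String.mk (List.replicate (n + 1) 'a') ++ " + "
    poly ++ pvArec n

def normal_polynomial_text (order : Int) : String := pvArec order.toNat

-- ===== PORT B =====
-- one term "d"*(k-i) + "a"*i + " + "
def pvTerm (k i : Nat) : String :=
  String.mk (List.replicate (k - i) 'd') ++ String.mk (List.replicate i 'a') ++ " + "

-- the parts contributed by one value of k (inner loop plus the trailing "a"*k term)
def pvBlock (k : Nat) : List String :=
  (List.range k).map (pvTerm k) ++ [String.mk (List.replicate k 'a') ++ " + "]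

-- range(order, 0, -1) = order, order-1, …, 1
def normal_polynomial_text_alt (order : Int) : String :=
  String.join ((((List.range order.toNat).reverse).map (· + 1)).flatMap pvBlock)

-- ===== PRECONDITION & SPEC =====
-- Pre_ excludes negative order, where Python A never terminates (RecursionError).
def Pre_normal_polynomial_text (order : Int) : Prop := 0 ≤ order
instance (order : Int) : Decidable (Pre_normal_polynomial_text order) := by
  unfold Pre_normal_polynomial_text; infer_instance
def pvWitness_normal_polynomial_text : Int := 3

def Spec_normal_polynomial_text (order : Int) (out : String) : Prop :=
  out = normal_polynomial_text_alt order
instance (order : Int) (out : String) : Decidable (Spec_normal_polynomial_text order out) := by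
  unfold Spec_normal_polynomial_text; infer_instance

-- ===== CLAIM =====
def Claim_equal_normal_polynomial_text : Prop :=
  ∀ (order : Int), Dom_normal_polynomial_text order →
    Pre_normal_polynomial_text order →
    Spec_normal_polynomial_text order (normal_polynomial_text order)

-- ===== LEMMAS AND PROOFS =====
theorem pv_foldl_app (l : List String) (s : String) :
    l.foldl (· ++ ·) s = s ++ l.foldl (· ++ ·) "" := by
  induction l generalizing s with
  | nil => simp
  | cons a t ih =>
    rw [List.foldl_cons, List.foldl_cons, ih, ih ("" ++ a)]
    simp [String.append_assoc]

theorem pv_join_cons (a : String) (t : List String) :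
    String.join (a :: t) = a ++ String.join t := by
  simpa [String.join] using pv_foldl_app t a

theorem pv_foldl_join (f g : Nat → String) (w : String) (l : List Nat) (s : String) :
    l.foldl (fun p i => p ++ f i ++ g i ++ w) s
      = s ++ String.join (l.map (fun i => f i ++ g i ++ w)) := by
  induction l generalizing s with
  | nil => simp [String.join]
  | cons a t ih =>
    rw [List.foldl_cons, ih]
    simp [pv_join_cons, String.append_assoc]

theorem pv_join_append (l1 l2 : List String) :
    String.join (l1 ++ l2) = String.join l1 ++ String.join l2 := by
  induction l1 with
  | nil => simp [String.join]
  | cons a t ih => simp [pv_join_cons, ih, String.append_assoc]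

theorem pv_rec_eq (n : Nat) :
    pvArec n = String.join ((((List.range n).reverse).map (· + 1)).flatMap pvBlock) := by
  induction n with
  | zero => simp [pvArec, String.join]
  | succ n ih =>
    have hr : ((List.range (n + 1)).reverse).map (· + 1)
        = (n + 1) :: ((List.range n).reverse).map (· + 1) := by
      simp [List.range_succ]
    rw [pvArec, hr, List.flatMap_cons, pv_join_append, ← ih]
    rw [pv_foldl_join (fun i => String.mk (List.replicate (n + 1 - i) 'd'))
          (fun i => String.mk (List.replicate i 'a')) " + "]
    have hterm : (fun i => String.mk (List.replicate (n + 1 - i) 'd')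
        ++ String.mk (List.replicate i 'a') ++ " + ") = pvTerm (n + 1) := rfl
    rw [hterm]
    simp [pvBlock, String.join, String.append_assoc]

-- ===== VERDICT =====
theorem normal_polynomial_text_spec : Claim_equal_normal_polynomial_text := by
  intro order _ _
  unfold Spec_normal_polynomial_text normal_polynomial_text normal_polynomial_text_alt
  exact pv_rec_eq order.toNat
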